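-- pv_equiv track=rewrite | github.com/bythedoor/pychatbot-ndouga-ouari-e | functions.py | token_question
-- ===== SOURCE A (Python) =====
-- def token_question(question):
--     q_clean = ""
--
--     # création du token de chaque mot de la question
--     for i in question:
--
--         # convertit les majuscules en minuscules
--         if ord(i) >= 65 and ord(i) <= 90:
--             q_clean += (chr(ord(i) + 32))
--
--         # convertit les caractères spéciaux en espace
--         elif (ord(i) > 32 and ord(i) <= 47) or (ord(i) >= 58 and ord(i) <= 64):
--             q_clean += ' '
--
--         # si le caractère n'est ni une majuscule, ni un caractère spécial, on le garde dans le token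
--         else:
--             q_clean += i
--
--     L = q_clean.split()  # sépare les différents mots de la question
--     return L
-- ===== SOURCE B (Python) =====
-- def token_question(question):
--     table = {code: code + 32 for code in range(65, 91)}
--     for code in list(range(33, 48)) + list(range(58, 65)):
--         table[code] = ord(' ')
--     return question.translate(table).split()
-- ===== Notes on version B (the rewrite author's own statement) =====
-- stated objective: idiomatic
-- what changed: Replaces A's per-character if/elif branch loop with string concatenation by a translation table (dict of code points) built once and applied with str.translate, then the same .split().
import Mathlib
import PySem

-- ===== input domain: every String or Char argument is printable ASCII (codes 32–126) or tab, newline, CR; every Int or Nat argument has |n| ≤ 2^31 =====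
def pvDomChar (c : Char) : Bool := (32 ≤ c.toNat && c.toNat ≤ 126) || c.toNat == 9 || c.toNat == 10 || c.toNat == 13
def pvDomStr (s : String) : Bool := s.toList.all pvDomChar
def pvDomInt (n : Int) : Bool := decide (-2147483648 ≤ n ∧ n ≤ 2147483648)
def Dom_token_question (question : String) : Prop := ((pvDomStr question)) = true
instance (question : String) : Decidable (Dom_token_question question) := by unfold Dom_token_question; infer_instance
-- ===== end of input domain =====

set_option maxRecDepth 40000


-- B replaces A's per-character branch loop by a translation table built once and str.translate;
-- objective: idiomatic (same cost).

-- ===== PORT A =====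
def token_question (question : String) : List String :=
  let q_clean : List Char := question.toList.foldl (fun acc i =>
    if 65 ≤ i.toNat ∧ i.toNat ≤ 90 then acc ++ [Char.ofNat (i.toNat + 32)]
    else if (32 < i.toNat ∧ i.toNat ≤ 47) ∨ (58 ≤ i.toNat ∧ i.toNat ≤ 64) then acc ++ [' ']
    else acc ++ [i]) []
  PySem.Str.split₀ (String.ofList q_clean)

-- ===== PORT B =====
-- str.translate ported by hand: each char's code point is looked up in the table,
-- a mapped int becomes that code point's char, an unmapped char passes through (exact here:
-- all table values are valid code points and no value is None).
def token_question_alt (question : String) : List String :=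
  let table : PySem.Dict Int Int :=
    (PySem.List.pyRange 65 91 1).foldl (fun d code => d.insert code (code + 32)) PySem.Dict.empty
  let table : PySem.Dict Int Int :=
    (PySem.List.pyRange 33 48 1 ++ PySem.List.pyRange 58 65 1).foldl
      (fun d code => d.insert code 32) table
  PySem.Str.split₀ (String.ofList (question.toList.map (fun c =>
    match table.get? ((c.toNat : Int)) with
    | some v => Char.ofNat v.toNat
    | none => c)))

-- ===== PRECONDITION & SPEC =====
def Spec_token_question (question : String) (out : List String) : Prop := out = token_question_alt question
instance (question : String) (out : List String) : Decidable (Spec_token_question question out) := by unfold Spec_token_question; infer_instance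

-- ===== CLAIM (what is proved, stated in full; the proofs are below) =====
def Claim_equal_token_question : Prop := ∀ (question : String), Dom_token_question question → Spec_token_question question (token_question question)

-- ===== LEMMAS AND PROOFS =====

-- A's per-character transformation
def pvChA (i : Char) : Char :=
  if 65 ≤ i.toNat ∧ i.toNat ≤ 90 then Char.ofNat (i.toNat + 32)
  else if (32 < i.toNat ∧ i.toNat ≤ 47) ∨ (58 ≤ i.toNat ∧ i.toNat ≤ 64) then ' '
  else i

def pvTable : PySem.Dict Int Int :=
  (PySem.List.pyRange 33 48 1 ++ PySem.List.pyRange 58 65 1).foldl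
    (fun d code => d.insert code 32)
    ((PySem.List.pyRange 65 91 1).foldl (fun d code => d.insert code (code + 32)) PySem.Dict.empty)

-- B's per-character transformation
def pvChB (c : Char) : Char :=
  match pvTable.get? ((c.toNat : Int)) with
  | some v => Char.ofNat v.toNat
  | none => c

theorem pvA_fold_eq_map (l : List Char) (acc : List Char) :
    l.foldl (fun acc i =>
      if 65 ≤ i.toNat ∧ i.toNat ≤ 90 then acc ++ [Char.ofNat (i.toNat + 32)]
      else if (32 < i.toNat ∧ i.toNat ≤ 47) ∨ (58 ≤ i.toNat ∧ i.toNat ≤ 64) then acc ++ [' ']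
      else acc ++ [i]) acc = acc ++ l.map pvChA := by
  induction l generalizing acc with
  | nil => simp
  | cons x xs ih =>
    simp only [List.foldl_cons, List.map_cons, ih, pvChA]
    split_ifs <;> simp

set_option maxRecDepth 10000 in
theorem pvCh_eq_fin : ∀ n : Fin 127, pvChB (Char.ofNat n.val) = pvChA (Char.ofNat n.val) := by
  decide

theorem pvOfNat_toNat (c : Char) (h : c.toNat ≤ 126) : Char.ofNat c.toNat = c := by
  apply Char.ext
  rw [Char.val_ofNat]
  · exact UInt32.ofNat_toNat
  · exact Or.inl (by omega)

theorem pvCh_eq (c : Char) (h : pvDomChar c = true) : pvChB c = pvChA c := by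
  have hle : c.toNat ≤ 126 := by
    simp [pvDomChar] at h; omega
  have := pvCh_eq_fin ⟨c.toNat, by omega⟩
  simpa [pvOfNat_toNat c hle] using this

-- ===== VERDICT (by name: the statement is the Claim_ definition above) =====
theorem token_question_spec : Claim_equal_token_question := by
  intro q hdom
  have hB : token_question_alt q = PySem.Str.split₀ (String.ofList (q.toList.map pvChB)) := rfl
  have hA : token_question q = PySem.Str.split₀ (String.ofList (q.toList.map pvChA)) := by
    unfold token_question
    rw [pvA_fold_eq_map, List.nil_append]
  unfold Spec_token_question
  rw [hA, hB]
  congr 1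
  congr 1
  apply List.map_congr_left
  intro c hc
  have hd : pvDomChar c = true := by
    have := (List.all_eq_true.mp hdom) c hc
    simpa using this
  exact (pvCh_eq c hd).symm
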